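/-
  READING MEMORY AT A NUMBER. An address of an invariant is a `Nat`; `rd mem a n` is the `n`-byte little-endian value at it.
  The walker shows a load as `mem.readLE w n` with `w : Word` a register expression (`rbx + 0x70`); the bridges below connect the two.

      rd mem a n                 `mem.readLE (UInt64.ofNat a) n`
      rd_eq_readLE               the load `mem.readLE w n` IS `rd mem a n` when `w.toNat = a`
      rd_lt                      a value of `n` bytes is below `2 ^ (8 n)` (in Gif/Spec/Words.lean, with the word lemmas)
      EqOn.rd / SameExcept.rd    a read away from what changed
      rd_writeLE_disjoint        a read through one store elsewhere
      rd_writeLE_same            reading back what was just stored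
-/
import ProgX.Base.Spec.Basic
import Gif.Spec.Attr
namespace Gif.Spec
open X86 X86.User Asan

/-- **The `n`-byte little-endian value at the address `a`** (a number). -/
def rd (mem : Mem) (a n : Nat) : Nat := mem.readLE (UInt64.ofNat a) n

theorem rd_def (mem : Mem) (a n : Nat) : rd mem a n = mem.readLE (UInt64.ofNat a) n := id rfl

/-- The word of an address below `2 ^ 64` has that value. -/
theorem toNat_ofNat_addr (a : Nat) (h : a < 2 ^ 64) : (UInt64.ofNat a).toNat = a := by
  rw [UInt64.toNat_ofNat']
  exact Nat.mod_eq_of_lt h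

/-- **The walker's load is the invariant's read**: `w` is the word the machine computed, `a` the number the invariant speaks of. -/
theorem rd_eq_readLE (mem : Mem) (w : Word) (a n : Nat) (h : w.toNat = a) : mem.readLE w n = rd mem a n := by
  unfold rd
  rw [← h, UInt64.ofNat_toNat]

/-- A read in a memory that agrees on the bytes read. -/
theorem _root_.X86.User.Mem.EqOn.rd {lo hi : Nat} {mem mem' : Mem} (h : Mem.EqOn lo hi mem mem') (a n : Nat) (h1 : lo ≤ a)
    (h2 : a + n ≤ hi) (h3 : a + n < 2 ^ 64) : Gif.Spec.rd mem' a n = Gif.Spec.rd mem a n := by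
  unfold Gif.Spec.rd
  have e : (UInt64.ofNat a).toNat = a := toNat_ofNat_addr a (by omega)
  exact h.readLE (UInt64.ofNat a) n (by omega) (by omega) (by omega)

/-- A read off a footprint. -/
theorem _root_.X86.User.Mem.SameExcept.rd {ws : List Span} {mem mem' : Mem} (h : Mem.SameExcept ws mem mem') (a n : Nat)
    (h3 : a + n < 2 ^ 64) (hd : ∀ w ∈ ws, a + n ≤ w.lo ∨ w.hi ≤ a) : Gif.Spec.rd mem' a n = Gif.Spec.rd mem a n :=
  (h.eqOn a (a + n) hd).rd a n (Nat.le_refl _) (Nat.le_refl _) h3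

/-- A read through one store that does not meet it. -/
theorem rd_writeLE_disjoint (mem : Mem) (w : Word) (k v a n : Nat) (hk : w.toNat + k < 2 ^ 64) (h3 : a + n < 2 ^ 64)
    (hd : a + n ≤ w.toNat ∨ w.toNat + k ≤ a) : rd (mem.writeLE w k v) a n = rd mem a n :=
  (Mem.EqOn.writeLE a (a + n) mem w k v hk hd.symm).rd a n (Nat.le_refl _) (Nat.le_refl _) h3

/-- Reading back the `n` bytes just stored at the same address. -/
theorem rd_writeLE_same (mem : Mem) (w : Word) (n v a : Nat) (hw : w.toNat = a) (hn : n ≤ 8) :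
    rd (mem.writeLE w n v) a n = v % 256 ^ n := by
  unfold rd
  rw [← hw, UInt64.ofNat_toNat]
  exact Mem.readLE_writeLE_same mem w n v (by omega)

end Gif.Spec
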